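-- pv_equiv track=rewrite | github.com/idanso/battleship-game | server_service.py | set_markers
-- ===== SOURCE A (Python) =====
-- def set_markers(board):
--     """
--     Function creates the lists of the markers to the side of the game board which indicates
--     the number of ship pieces in each row and column.
--
--     :param: board: list of board tiles
--     :returns: the 2 lists of markers with number of ship pieces in each row (xmarkers)
--         and column (ymarkers)
--     """
--     size_col = len(board[1])
--     size_rows = len(board[0])
--     xmarkers = [0 for i in range(size_col)]
--     ymarkers = [0 for i in range(size_rows)]
--     # Loop through the tiles
--     for tilex in range(size_col):
--         for tiley in range(size_rows):
--             if board[tilex][tiley][0] is not None:  # if the tile is a ship piece, then increment the markers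
--                 xmarkers[tilex] += 1
--                 ymarkers[tiley] += 1
--
--     return xmarkers, ymarkers
-- ===== SOURCE B (Python) =====
-- def set_markers(board):
--     size_col = len(board[1])
--     size_rows = len(board[0])
--     xmarkers = [sum(board[x][y][0] is not None for y in range(size_rows))
--                 for x in range(size_col)]
--     ymarkers = [sum(board[x][y][0] is not None for x in range(size_col))
--                 for y in range(size_rows)]
--     return xmarkers, ymarkers
-- ===== Notes on version B (the rewrite author's own statement) =====
-- stated objective: simpler
-- what changed: Replaces the single nested loop that mutates two index-addressed accumulator lists in place with two independent pure counting comprehensions (one per marker list), eliminating the mutable state entirely.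
import Mathlib
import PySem

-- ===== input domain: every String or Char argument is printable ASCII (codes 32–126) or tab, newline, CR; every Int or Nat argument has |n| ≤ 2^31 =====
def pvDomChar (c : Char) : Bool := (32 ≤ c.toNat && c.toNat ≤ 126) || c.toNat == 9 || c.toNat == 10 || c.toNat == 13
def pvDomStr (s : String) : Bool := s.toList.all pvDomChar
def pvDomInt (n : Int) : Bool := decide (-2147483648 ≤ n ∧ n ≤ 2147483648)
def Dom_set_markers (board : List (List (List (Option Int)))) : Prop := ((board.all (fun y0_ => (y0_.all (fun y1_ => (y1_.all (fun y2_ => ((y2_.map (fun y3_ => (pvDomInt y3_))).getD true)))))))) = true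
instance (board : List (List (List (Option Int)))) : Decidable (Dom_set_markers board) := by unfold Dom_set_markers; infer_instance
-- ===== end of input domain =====

-- B replaces A's single nested loop mutating two index-addressed accumulators with two
-- independent pure counting passes (simpler; same asymptotic cost).

-- ===== PORT A =====
-- board[tilex][tiley][0] is not None  (getD defaults are harmless: Pre_ keeps every access in range)
def pvPiece (board : List (List (List (Option Int)))) (x y : Nat) : Bool :=
  (((board.getD x []).getD y []).getD 0 none).isSome

-- body of A's inner loop: the two in-place increments
def pvStep (board : List (List (List (Option Int)))) (tilex : Nat)
    (st : List Int × List Int) (tiley : Nat) : List Int × List Int :=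
  if pvPiece board tilex tiley then
    (st.1.set tilex (st.1.getD tilex 0 + 1), st.2.set tiley (st.2.getD tiley 0 + 1))
  else st

-- A's inner loop: for tiley in range(size_rows)
def pvInner (board : List (List (List (Option Int)))) (n : Nat) (tilex : Nat)
    (st : List Int × List Int) : List Int × List Int :=
  (List.range n).foldl (pvStep board tilex) st

def set_markers (board : List (List (List (Option Int)))) : List Int × List Int :=
  let size_col := (board.getD 1 []).length
  let size_rows := (board.getD 0 []).length
  -- xmarkers = [0]*size_col, ymarkers = [0]*size_rows, then the nested mutating loop
  (List.range size_col).foldl (fun st tilex => pvInner board size_rows tilex st)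
    (List.replicate size_col 0, List.replicate size_rows 0)

-- ===== PORT B =====
-- sum(board[x][y][0] is not None for y in range(n))
def pvRowSum (board : List (List (List (Option Int)))) (x n : Nat) : Int :=
  (List.range n).foldl (fun s y => s + (if pvPiece board x y then 1 else 0)) 0

-- sum(board[x][y][0] is not None for x in range(m))
def pvColSum (board : List (List (List (Option Int)))) (y m : Nat) : Int :=
  (List.range m).foldl (fun s x => s + (if pvPiece board x y then 1 else 0)) 0

def set_markers_alt (board : List (List (List (Option Int)))) : List Int × List Int :=
  let size_col := (board.getD 1 []).length
  let size_rows := (board.getD 0 []).length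
  ((List.range size_col).map (fun x => pvRowSum board x size_rows),
   (List.range size_rows).map (fun y => pvColSum board y size_col))

-- ===== PRECONDITION & SPEC =====
-- Pre_ is exactly the inputs on which the Python A returns: board has the two rows whose
-- lengths it reads, and every tile access board[tilex][tiley][0] of the loop is in range.
def Pre_set_markers (board : List (List (List (Option Int)))) : Prop :=
  2 ≤ board.length ∧
  ∀ x ∈ List.range (board.getD 1 []).length,
    x < board.length ∧
    ∀ y ∈ List.range (board.getD 0 []).length,
      y < (board.getD x []).length ∧ (board.getD x []).getD y [] ≠ []
instance (board : List (List (List (Option Int)))) : Decidable (Pre_set_markers board) := by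
  unfold Pre_set_markers; infer_instance

def pvWitness_set_markers : List (List (List (Option Int))) := [[[some 1]], [[none]]]

def Spec_set_markers (board : List (List (List (Option Int)))) (out : List Int × List Int) : Prop := out = set_markers_alt board
instance (board : List (List (List (Option Int)))) (out : List Int × List Int) : Decidable (Spec_set_markers board out) := by unfold Spec_set_markers; infer_instance

-- ===== CLAIM (what is proved, stated in full; the proofs are below) =====
def Claim_equal_set_markers : Prop := ∀ (board : List (List (List (Option Int)))), Dom_set_markers board → Pre_set_markers board → Spec_set_markers board (set_markers board)

-- ===== LEMMAS AND PROOFS =====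

theorem pvGetD_set_self (l : List Int) (i : Nat) (h : i < l.length) (v : Int) :
    (l.set i v).getD i 0 = v := by
  simp [List.getD, h]

theorem pvGetD_set_ne (l : List Int) (i j : Nat) (h : i ≠ j) (v : Int) :
    (l.set i v).getD j 0 = l.getD j 0 := by
  simp [List.getD, List.getElem?_set_ne, h]

theorem pvRowSum_succ (board : List (List (List (Option Int)))) (x n : Nat) :
    pvRowSum board x (n + 1) = pvRowSum board x n + (if pvPiece board x n then 1 else 0) := by
  simp [pvRowSum, List.range_succ]

theorem pvColSum_succ (board : List (List (List (Option Int)))) (y m : Nat) :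
    pvColSum board y (m + 1) = pvColSum board y m + (if pvPiece board m y then 1 else 0) := by
  simp [pvColSum, List.range_succ]

theorem pvInner_succ (board : List (List (List (Option Int)))) (n x : Nat)
    (st : List Int × List Int) :
    pvInner board (n + 1) x st = pvStep board x (pvInner board n x st) n := by
  simp [pvInner, List.range_succ]

theorem pvInner_char (board : List (List (List (Option Int)))) (x : Nat) :
    ∀ (n : Nat) (st : List Int × List Int), x < st.1.length → n ≤ st.2.length →
      ((pvInner board n x st).1.length = st.1.length ∧
       (pvInner board n x st).2.length = st.2.length) ∧
      (∀ i, (pvInner board n x st).1.getD i 0 =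
        st.1.getD i 0 + (if i = x then pvRowSum board x n else 0)) ∧
      (∀ j, (pvInner board n x st).2.getD j 0 =
        st.2.getD j 0 + (if j < n ∧ pvPiece board x j then 1 else 0)) := by
  intro n
  induction n with
  | zero =>
    intro st _ _
    refine ⟨⟨rfl, rfl⟩, ?_, ?_⟩ <;> intro k <;> simp [pvInner, pvRowSum]
  | succ n ih =>
    intro st hx hn
    have hn' : n ≤ st.2.length := Nat.le_of_succ_le hn
    obtain ⟨⟨hl1, hl2⟩, h1, h2⟩ := ih st hx hn'
    rw [pvInner_succ]
    unfold pvStep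
    by_cases hg : pvPiece board x n
    · simp only [hg, if_true]
      have hxlt : x < (pvInner board n x st).1.length := hl1 ▸ hx
      have hnlt : n < (pvInner board n x st).2.length := hl2 ▸ hn
      refine ⟨⟨by simpa using hl1, by simpa using hl2⟩, ?_, ?_⟩
      · intro i
        by_cases hix : i = x
        · subst hix
          rw [pvGetD_set_self _ _ hxlt, h1 i, pvRowSum_succ, hg]
          simp [add_assoc]
        · rw [pvGetD_set_ne _ _ _ (fun h => hix h.symm), h1 i]
          simp [hix]
      · intro j
        by_cases hjn : j = n
        · subst hjn
          rw [pvGetD_set_self _ _ hnlt, h2 j]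
          simp [hg]
        · rw [pvGetD_set_ne _ _ _ (fun h => hjn h.symm), h2 j]
          have : (j < n ∧ pvPiece board x j) ↔ (j < n + 1 ∧ pvPiece board x j) := by
            constructor
            · rintro ⟨h, hp⟩; exact ⟨Nat.lt_succ_of_lt h, hp⟩
            · rintro ⟨h, hp⟩; exact ⟨Nat.lt_of_le_of_ne (Nat.lt_succ_iff.mp h) hjn, hp⟩
          rw [if_congr this rfl rfl]
    · simp only [hg, Bool.false_eq_true, if_false]
      refine ⟨⟨hl1, hl2⟩, ?_, ?_⟩
      · intro i
        rw [h1 i, pvRowSum_succ]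
        simp [hg]
      · intro j
        rw [h2 j]
        have : (j < n ∧ pvPiece board x j) ↔ (j < n + 1 ∧ pvPiece board x j) := by
          constructor
          · rintro ⟨h, hp⟩; exact ⟨Nat.lt_succ_of_lt h, hp⟩
          · rintro ⟨h, hp⟩
            rcases Nat.lt_succ_iff_lt_or_eq.mp h with h' | h'
            · exact ⟨h', hp⟩
            · subst h'; exact absurd hp hg
        rw [if_congr this rfl rfl]

-- A's outer loop, truncated to its first m iterations
def pvOuter (board : List (List (List (Option Int)))) (m : Nat) : List Int × List Int :=
  (List.range m).foldl (fun st tilex => pvInner board (board.getD 0 []).length tilex st)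
    (List.replicate (board.getD 1 []).length 0, List.replicate (board.getD 0 []).length 0)

theorem pvOuter_succ (board : List (List (List (Option Int)))) (m : Nat) :
    pvOuter board (m + 1) = pvInner board (board.getD 0 []).length m (pvOuter board m) := by
  simp [pvOuter, List.range_succ]

theorem pvOuter_char (board : List (List (List (Option Int)))) :
    ∀ m, m ≤ (board.getD 1 []).length →
      ((pvOuter board m).1.length = (board.getD 1 []).length ∧
       (pvOuter board m).2.length = (board.getD 0 []).length) ∧
      (∀ i, (pvOuter board m).1.getD i 0 =
        (if i < m then pvRowSum board i (board.getD 0 []).length else 0)) ∧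
      (∀ j, (pvOuter board m).2.getD j 0 =
        (if j < (board.getD 0 []).length then pvColSum board j m else 0)) := by
  intro m
  induction m with
  | zero =>
    intro _
    refine ⟨⟨by simp [pvOuter], by simp [pvOuter]⟩, ?_, ?_⟩ <;> intro k <;>
      simp [pvOuter, pvColSum, List.getD]
  | succ m ih =>
    intro hm
    have hm' : m ≤ (board.getD 1 []).length := Nat.le_of_succ_le hm
    obtain ⟨⟨hl1, hl2⟩, h1, h2⟩ := ih hm'
    have hx : m < (pvOuter board m).1.length := by rw [hl1]; exact hm
    have hn : (board.getD 0 []).length ≤ (pvOuter board m).2.length := by rw [hl2]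
    obtain ⟨⟨kl1, kl2⟩, k1, k2⟩ := pvInner_char board m (board.getD 0 []).length (pvOuter board m) hx hn
    rw [pvOuter_succ]
    refine ⟨⟨by rw [kl1, hl1], by rw [kl2, hl2]⟩, ?_, ?_⟩
    · intro i
      rw [k1 i, h1 i]
      by_cases him : i = m
      · subst him; simp
      · rcases Nat.lt_or_ge i m with h' | h'
        · simp [him, h', Nat.lt_succ_of_lt h']
        · have : ¬ i < m := Nat.not_lt.mpr h'
          have h'' : ¬ i < m + 1 := fun hlt =>
            him (Nat.le_antisymm (Nat.lt_succ_iff.mp hlt) h')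
          simp [him, this, h'']
    · intro j
      rw [k2 j, h2 j, pvColSum_succ]
      by_cases hj : j < (board.getD 0 []).length
      · by_cases hp : pvPiece board m j
        · rw [if_pos hj, if_pos hj, if_pos ⟨hj, hp⟩, if_pos hp]
        · rw [if_pos hj, if_pos hj, if_neg (fun h => hp h.2), if_neg hp]
      · rw [if_neg hj, if_neg hj, if_neg (fun h => hj h.1)]
        simp

theorem set_markers_eq_outer (board : List (List (List (Option Int)))) :
    set_markers board = pvOuter board (board.getD 1 []).length := by
  rfl

theorem pvList_eq_of_getD {l₁ l₂ : List Int} (hlen : l₁.length = l₂.length)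
    (h : ∀ i, l₁.getD i 0 = l₂.getD i 0) : l₁ = l₂ := by
  apply List.ext_getElem hlen
  intro i h₁ h₂
  have := h i
  rwa [List.getD_eq_getElem l₁ 0 h₁, List.getD_eq_getElem l₂ 0 h₂] at this

theorem pvGetD_map_range {f : Nat → Int} {n i : Nat} :
    ((List.range n).map f).getD i 0 = (if i < n then f i else 0) := by
  by_cases h : i < n
  · rw [List.getD_eq_getElem _ _ (by simpa using h)]
    simp [h]
  · rw [List.getD_eq_default _ _ (by simpa using Nat.not_lt.mp h)]
    simp [h]

-- ===== VERDICT (by name: the statement is the Claim_ definition above) =====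
theorem set_markers_spec : Claim_equal_set_markers := by
  intro board _ _
  unfold Spec_set_markers
  obtain ⟨⟨hl1, hl2⟩, h1, h2⟩ := pvOuter_char board (board.getD 1 []).length (le_refl _)
  rw [set_markers_eq_outer]
  unfold set_markers_alt
  refine Prod.ext ?_ ?_
  · apply pvList_eq_of_getD (by simpa using hl1)
    intro i
    rw [h1 i, pvGetD_map_range]
  · apply pvList_eq_of_getD (by simpa using hl2)
    intro j
    rw [h2 j, pvGetD_map_range]
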